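-- pv_equiv track=rewrite | github.com/miliar/Code_Jam_Webscraper | solutions_python/Problem_137/508.py | placeFree
-- ===== SOURCE A (Python) =====
-- def wouldAdd(grid, r, c):
--     rMin = max(0, r-1)
--     rMax = min(len(grid), r+2)
--     cMin = max(0, c-1)
--     cMax = min(len(grid[0]), c+2)
--     wA = 0
--     for r in range(rMin, rMax):
--         for c in range(cMin, cMax):
--             wA += grid[r][c] == '*'
--     return wA
--
-- def add(grid, r, c):
--     rMin = max(0, r-1)
--     rMax = min(len(grid), r+2)
--     cMin = max(0, c-1)
--     cMax = min(len(grid[0]), c+2)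
--     wA = 0
--     for r in range(rMin, rMax):
--         for c in range(cMin, cMax):
--             grid[r][c] = '.'
--     return grid
--
-- def placeFree(grid, freeSpaces):
--     for r in range(len(grid)):
--         for c in range(len(grid[0])):
--             if grid[r][c] != '.':
--                 continue
--
--             wA = wouldAdd(grid, r, c)
--             if wA > 0 and wA <= freeSpaces:
--                 grid = add(grid, r, c)
--                 return (grid, wA)
--     return (grid, 0)
-- ===== SOURCE B (Python) =====
-- def placeFree(grid, freeSpaces):
--     if not grid:
--         return (grid, 0)
--     w = len(grid[0])
--     R = len(grid)
--     # per-row prefix sums of mine counts, built once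
--     pref = []
--     for row in grid:
--         ps = [0]
--         for j in range(w):
--             ps.append(ps[-1] + (row[j] == '*'))
--         pref.append(ps)
--     for r in range(R):
--         for c in range(w):
--             if grid[r][c] != '.':
--                 continue
--             rMin, rMax = max(0, r - 1), min(R, r + 2)
--             cMin, cMax = max(0, c - 1), min(w, c + 2)
--             cnt = 0
--             for i in range(rMin, rMax):
--                 cnt += pref[i][cMax] - pref[i][cMin]
--             if 0 < cnt <= freeSpaces:
--                 for i in range(rMin, rMax):
--                     for j in range(cMin, cMax):
--                         grid[i][j] = '.'
--                 return (grid, cnt)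
--     return (grid, 0)
-- ===== Notes on version B (the rewrite author's own statement) =====
-- stated objective: alternative
-- what changed: B builds a per-row prefix-sum table of mine counts once and computes each 3x3 window count by prefix differences (one O(1) lookup per window row), instead of A's per-cell wouldAdd helper that rescans the whole clamped window cell by cell.
import Mathlib
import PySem

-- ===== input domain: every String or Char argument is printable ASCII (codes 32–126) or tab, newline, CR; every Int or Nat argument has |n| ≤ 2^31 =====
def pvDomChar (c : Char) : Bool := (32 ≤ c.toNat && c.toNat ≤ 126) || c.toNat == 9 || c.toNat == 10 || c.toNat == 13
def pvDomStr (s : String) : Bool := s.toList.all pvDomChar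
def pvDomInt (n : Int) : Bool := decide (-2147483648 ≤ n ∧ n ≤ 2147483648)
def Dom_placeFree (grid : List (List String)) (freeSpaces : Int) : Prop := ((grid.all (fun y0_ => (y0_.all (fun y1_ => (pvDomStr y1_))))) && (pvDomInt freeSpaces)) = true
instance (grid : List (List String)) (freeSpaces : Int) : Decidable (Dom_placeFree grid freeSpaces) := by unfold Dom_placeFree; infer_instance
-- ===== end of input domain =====

-- B replaces A's per-cell 3x3 rescan (wouldAdd) by a per-row prefix-sum table built once,
-- reading each window's mine count off prefix differences (objective: alternative, same cost).
-- Both A and B mutate the grid's rows in place in Python; B performs the same mutation as A.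

-- ===== PORT A =====
-- wouldAdd(grid, r, c): count '*' in the clamped 3x3 window (Nat subtraction = Python's max(0, ·-1))
def wouldAddA (grid : List (List String)) (r c : Nat) : Int :=
  (List.range' (r - 1) (min grid.length (r + 2) - (r - 1))).foldl
    (fun acc rr =>
      (List.range' (c - 1) (min (grid.headD []).length (c + 2) - (c - 1))).foldl
        (fun a2 cc => a2 + (if (grid.getD rr []).getD cc "" = "*" then (1 : Int) else 0)) acc)
    0

-- add(grid, r, c): overwrite the clamped window with '.'
def addA (grid : List (List String)) (r c : Nat) : List (List String) :=
  (List.range' (r - 1) (min grid.length (r + 2) - (r - 1))).foldl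
    (fun g rr =>
      (List.range' (c - 1) (min (grid.headD []).length (c + 2) - (c - 1))).foldl
        (fun g2 cc => g2.set rr ((g2.getD rr []).set cc ".")) g)
    grid

-- the row-major scan with 'continue' and early return, over the flattened index pairs
def goA (grid : List (List String)) (fs : Int) : List (Nat × Nat) → List (List String) × Int
  | [] => (grid, 0)
  | (r, c) :: rest =>
    if (grid.getD r []).getD c "" ≠ "." then goA grid fs rest
    else
      let wA := wouldAddA grid r c
      if wA > 0 ∧ wA ≤ fs then (addA grid r c, wA) else goA grid fs rest

def placeFree (grid : List (List String)) (freeSpaces : Int) : List (List String) × Int :=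
  goA grid freeSpaces
    ((List.range grid.length).flatMap fun r =>
      (List.range (grid.headD []).length).map fun c => (r, c))

-- ===== PORT B =====
-- ps = [0]; for j in range(w): ps.append(ps[-1] + (row[j] == '*'))
def rowPrefB (w : Nat) (row : List String) : List Int :=
  (List.range w).foldl
    (fun ps j => ps ++ [ps.getLastD 0 + (if row.getD j "" = "*" then (1 : Int) else 0)])
    [0]

def prefTableB (w : Nat) (grid : List (List String)) : List (List Int) :=
  grid.map (rowPrefB w)

-- cnt = 0; for i in range(rMin, rMax): cnt += pref[i][cMax] - pref[i][cMin]
def cntB (pref : List (List Int)) (rMin rMax cMin cMax : Nat) : Int :=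
  (List.range' rMin (rMax - rMin)).foldl
    (fun a i => a + ((pref.getD i []).getD cMax 0 - (pref.getD i []).getD cMin 0)) 0

-- for i in range(rMin, rMax): for j in range(cMin, cMax): grid[i][j] = '.'
def clearB (grid : List (List String)) (rMin rMax cMin cMax : Nat) : List (List String) :=
  (List.range' rMin (rMax - rMin)).foldl
    (fun g i =>
      (List.range' cMin (cMax - cMin)).foldl
        (fun g2 j => g2.set i ((g2.getD i []).set j ".")) g)
    grid

def goB (grid : List (List String)) (fs : Int) (pref : List (List Int)) (R w : Nat) :
    List (Nat × Nat) → List (List String) × Int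
  | [] => (grid, 0)
  | (r, c) :: rest =>
    if (grid.getD r []).getD c "" ≠ "." then goB grid fs pref R w rest
    else
      let cnt := cntB pref (r - 1) (min R (r + 2)) (c - 1) (min w (c + 2))
      if 0 < cnt ∧ cnt ≤ fs then
        (clearB grid (r - 1) (min R (r + 2)) (c - 1) (min w (c + 2)), cnt)
      else goB grid fs pref R w rest

def placeFree_alt (grid : List (List String)) (freeSpaces : Int) : List (List String) × Int :=
  if grid = [] then (grid, 0)
  else
    let w := (grid.headD []).length
    goB grid freeSpaces (prefTableB w grid) grid.length w
      ((List.range grid.length).flatMap fun r => (List.range w).map fun c => (r, c))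

-- ===== PRECONDITION & SPEC =====
-- Pre_ excludes ragged grids with a row shorter than the first row, on which the Python A
-- (and B) raises IndexError on most such inputs; A returns only when an early return happens
-- to precede the short row, an accident of scan order that B's table construction cannot share.
def Pre_placeFree (grid : List (List String)) (freeSpaces : Int) : Prop :=
  ∀ row ∈ grid, (grid.headD []).length ≤ row.length
instance (grid : List (List String)) (freeSpaces : Int) : Decidable (Pre_placeFree grid freeSpaces) := by
  unfold Pre_placeFree; infer_instance

def pvWitness_placeFree : List (List String) × Int := ([[".", "*"], [".", "."]], 3)

def Spec_placeFree (grid : List (List String)) (freeSpaces : Int) (out : List (List String) × Int) : Prop := out = placeFree_alt grid freeSpaces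
instance (grid : List (List String)) (freeSpaces : Int) (out : List (List String) × Int) : Decidable (Spec_placeFree grid freeSpaces out) := by unfold Spec_placeFree; infer_instance

-- ===== CLAIM (what is proved, stated in full; the proofs are below) =====
def Claim_equal_placeFree : Prop := ∀ (grid : List (List String)) (freeSpaces : Int), Dom_placeFree grid freeSpaces → Pre_placeFree grid freeSpaces → Spec_placeFree grid freeSpaces (placeFree grid freeSpaces)

-- ===== LEMMAS AND PROOFS =====

-- indicator of a mine at column j of a row
def mineInd (row : List String) (j : Nat) : Int :=
  if row.getD j "" = "*" then 1 else 0

-- prefix mine count of the first k columns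
def S0 (row : List String) (k : Nat) : Int :=
  ((List.range k).map (mineInd row)).sum

theorem sum_range_split (f : Nat → Int) (a b : Nat) (h : a ≤ b) :
    ((List.range b).map f).sum =
      ((List.range a).map f).sum + ((List.range' a (b - a)).map f).sum := by
  have hr : List.range b = List.range a ++ List.range' a (b - a) := by
    rw [List.range_eq_range', List.range_eq_range']
    have h2 : List.range' 0 a 1 ++ List.range' (0 + 1 * a) (b - a) 1 = List.range' 0 (a + (b - a)) 1 :=
      List.range'_append
    simp only [Nat.zero_add, Nat.one_mul] at h2
    rw [show a + (b - a) = b by omega] at h2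
    exact h2.symm
  rw [hr, List.map_append, List.sum_append]

theorem rowPrefB_eq (row : List String) (w : Nat) :
    rowPrefB w row = (List.range (w + 1)).map (S0 row) := by
  induction w with
  | zero => simp [rowPrefB, S0]
  | succ w ih =>
    have step : rowPrefB (w + 1) row =
        rowPrefB w row ++ [(rowPrefB w row).getLastD 0 + mineInd row w] := by
      simp [rowPrefB, List.range_succ, List.foldl_append, mineInd]
    rw [step, ih]
    have hlast : ((List.range (w + 1)).map (S0 row)).getLastD 0 = S0 row w := by
      rw [List.range_succ, List.map_append]
      simp
    rw [hlast]
    have hS : S0 row w + mineInd row w = S0 row (w + 1) := by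
      simp [S0, List.range_succ]
    rw [hS, List.range_succ (n := w + 1), List.map_append]
    simp

theorem rowPrefB_getD (row : List String) (w k : Nat) (hk : k ≤ w) :
    (rowPrefB w row).getD k 0 = S0 row k := by
  rw [rowPrefB_eq]
  have h1 : k < w + 1 := by omega
  simp [List.getD, h1]

theorem prefTableB_getD (grid : List (List String)) (w i : Nat) (hi : i < grid.length) :
    (prefTableB w grid).getD i [] = rowPrefB w (grid.getD i []) := by
  simp [prefTableB, List.getD, List.getElem?_map, List.getElem?_eq_getElem hi]

theorem wouldAddA_eq (grid : List (List String)) (r c : Nat) :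
    wouldAddA grid r c =
      ((List.range' (r - 1) (min grid.length (r + 2) - (r - 1))).map
        (fun rr => ((List.range' (c - 1) (min (grid.headD []).length (c + 2) - (c - 1))).map
          (mineInd (grid.getD rr []))).sum)).sum := by
  unfold wouldAddA
  rw [PySem.List.foldl_congr_mem _ _
      (fun acc rr => acc + ((List.range' (c - 1) (min (grid.headD []).length (c + 2) - (c - 1))).map
        (mineInd (grid.getD rr []))).sum) _
      (by intro acc rr _; exact PySem.List.foldl_add _ (mineInd (grid.getD rr [])) acc),
    PySem.List.foldl_add]
  simp

theorem cntB_eq (pref : List (List Int)) (rMin rMax cMin cMax : Nat) :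
    cntB pref rMin rMax cMin cMax =
      ((List.range' rMin (rMax - rMin)).map
        (fun i => (pref.getD i []).getD cMax 0 - (pref.getD i []).getD cMin 0)).sum := by
  unfold cntB
  rw [PySem.List.foldl_add]
  simp

theorem cnt_eq (grid : List (List String)) (r c : Nat)
    (hc : c < (grid.headD []).length) :
    cntB (prefTableB (grid.headD []).length grid) (r - 1) (min grid.length (r + 2))
        (c - 1) (min (grid.headD []).length (c + 2)) = wouldAddA grid r c := by
  rw [cntB_eq, wouldAddA_eq]
  apply congrArg
  apply List.map_congr_left
  intro i hi
  rw [List.mem_range'_1] at hi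
  have hiR : i < grid.length := by omega
  have hc1 : c - 1 ≤ (grid.headD []).length := by omega
  have hc2 : min (grid.headD []).length (c + 2) ≤ (grid.headD []).length := by omega
  have hcc : c - 1 ≤ min (grid.headD []).length (c + 2) := by omega
  rw [prefTableB_getD grid _ i hiR, rowPrefB_getD _ _ _ hc2, rowPrefB_getD _ _ _ hc1]
  simp only [S0]
  rw [sum_range_split (mineInd (grid.getD i [])) (c - 1) (min (grid.headD []).length (c + 2)) hcc]
  ring

theorem addA_eq (grid : List (List String)) (r c : Nat) :
    addA grid r c =
      clearB grid (r - 1) (min grid.length (r + 2)) (c - 1)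
        (min (grid.headD []).length (c + 2)) := by
  rfl

theorem go_eq (grid : List (List String)) (fs : Int) (pairs : List (Nat × Nat))
    (hp : ∀ p ∈ pairs, p.2 < (grid.headD []).length) :
    goA grid fs pairs =
      goB grid fs (prefTableB (grid.headD []).length grid) grid.length
        (grid.headD []).length pairs := by
  induction pairs with
  | nil => rfl
  | cons p rest ih =>
    obtain ⟨r, c⟩ := p
    have hc : c < (grid.headD []).length := hp (r, c) (List.mem_cons_self ..)
    have hrest : ∀ p ∈ rest, p.2 < (grid.headD []).length := fun p hpm => hp p (List.mem_cons_of_mem _ hpm)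
    simp only [goA, goB]
    rw [cnt_eq grid r c hc, addA_eq]
    simp only [gt_iff_lt]
    split_ifs with h1 h2 <;> first | rfl | exact ih hrest

-- ===== VERDICT (by name: the statement is the Claim_ definition above) =====
theorem placeFree_spec : Claim_equal_placeFree := by
  intro grid freeSpaces _ _
  unfold Spec_placeFree placeFree placeFree_alt
  by_cases hg : grid = []
  · subst hg; rfl
  · simp only [hg, ite_false]
    apply go_eq
    intro p hp
    simp only [List.mem_flatMap, List.mem_map, List.mem_range] at hp
    obtain ⟨r, hr, c, hcm, rfl⟩ := hp
    exact hcm
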